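-- pv_equiv track=rewrite | github.com/ovalados/ovalados-ysisi | fix_keys_f5.py | insert_before_close
-- ===== SOURCE A (Python) =====
-- def insert_before_close(content, section_key, new_text):
--     sec_start = content.find(f"\n  {section_key}: {{")
--     sec_open  = content.index("{", sec_start + len(f"\n  {section_key}: "))
--     depth = 1; i = sec_open + 1
--     while i < len(content) and depth > 0:
--         if content[i] == "{": depth += 1
--         elif content[i] == "}": depth -= 1
--         i += 1
--     sec_close = i - 1
--     return content[:sec_close] + "\n" + new_text + content[sec_close:]
-- ===== SOURCE B (Python) =====
-- def insert_before_close(content, section_key, new_text):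
--     sec_start = content.find(f"\n  {section_key}: {{")
--     sec_open = content.index("{", sec_start + len(f"\n  {section_key}: "))
--     depth, j = 1, sec_open + 1
--     sec_close = len(content) - 1
--     while True:
--         nc = content.find("}", j)
--         if nc == -1:
--             break
--         no = content.find("{", j)
--         if no != -1 and no < nc:
--             depth += 1
--             j = no + 1
--         else:
--             depth -= 1
--             if depth == 0:
--                 sec_close = nc
--                 break
--             j = nc + 1
--     return content[:sec_close] + "\n" + new_text + content[sec_close:]
-- ===== Notes on version B (the rewrite author's own statement) =====
-- stated objective: alternative
-- what changed: The character-by-character depth-counting while loop is replaced by a loop that jumps directly between the next '{' and '}' occurrences via str.find, updating the depth only at brace positions; the section-locating prefix and the final slice-and-concatenate are unchanged.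
import Mathlib
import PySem

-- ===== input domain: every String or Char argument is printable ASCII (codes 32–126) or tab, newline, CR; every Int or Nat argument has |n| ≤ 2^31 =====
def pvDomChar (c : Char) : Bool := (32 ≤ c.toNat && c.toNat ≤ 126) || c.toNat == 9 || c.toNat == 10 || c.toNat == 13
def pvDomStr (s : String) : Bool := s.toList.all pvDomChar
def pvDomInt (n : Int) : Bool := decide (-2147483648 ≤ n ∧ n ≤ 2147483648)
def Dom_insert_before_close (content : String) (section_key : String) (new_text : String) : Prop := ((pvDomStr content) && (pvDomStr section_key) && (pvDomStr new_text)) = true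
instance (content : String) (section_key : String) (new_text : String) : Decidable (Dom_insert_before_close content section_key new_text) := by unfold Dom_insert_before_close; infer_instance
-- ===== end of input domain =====

-- B replaces A's character-by-character depth loop by a loop that jumps between the next '{' / '}'
-- occurrences (str.find); equivalence of the return value is proved under Pre_ (content.index succeeds).

-- ===== PORT A =====
-- f"\n  {section_key}: " as a character list
def pvHeader (section_key : List Char) : List Char :=
  '\n' :: ' ' :: ' ' :: (section_key ++ [':', ' '])

-- A's while loop: rest = content[i:], i the absolute index, d the depth; returns sec_close = final i - 1
def pvALoop : List Char → Int → Int → Int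
  | [], i, _ => i - 1
  | c :: rest, i, d =>
    if 0 < d then
      pvALoop rest (i + 1) (if c = '{' then d + 1 else if c = '}' then d - 1 else d)
    else i - 1

def insert_before_close (content : String) (section_key : String) (new_text : String) : String :=
  let cs := content.toList
  let header := pvHeader section_key.toList
  let sec_start := PySem.Chars.find cs (header ++ ['{'])
  let sec_open := PySem.Chars.findFrom cs ['{'] (sec_start + header.length)  -- content.index: Pre_ excludes -1 (ValueError)
  let sec_close := pvALoop (cs.drop (sec_open.toNat + 1)) (sec_open + 1) 1
  String.ofList (PySem.Chars.slice cs none (some sec_close) ++ '\n' :: new_text.toList ++ PySem.Chars.slice cs (some sec_close) none)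

-- ===== PORT B =====
-- B's while loop: rest = content[j:]; content.find(sub, j) is computed as j + (relative find on the
-- suffix rest) — exact for 0 ≤ j ≤ len(content), which holds throughout the loop.
def pvBLoop (rest : List Char) (j d dflt : Int) : Int :=
  let nc := PySem.Chars.find rest ['}']
  if hnc : nc = -1 then dflt
  else
    let no := PySem.Chars.find rest ['{']
    if no ≠ -1 ∧ no < nc then
      pvBLoop (rest.drop (no.toNat + 1)) (j + no + 1) (d + 1) dflt
    else
      if d - 1 = 0 then j + nc
      else pvBLoop (rest.drop (nc.toNat + 1)) (j + nc + 1) (d - 1) dflt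
termination_by rest.length
decreasing_by
  · have hne : rest ≠ [] := by
      intro h; subst h
      exact hnc (by decide)
    have := List.length_pos_iff.mpr hne
    simp [List.length_drop]; omega
  · have hne : rest ≠ [] := by
      intro h; subst h
      exact hnc (by decide)
    have := List.length_pos_iff.mpr hne
    simp [List.length_drop]; omega

def insert_before_close_alt (content : String) (section_key : String) (new_text : String) : String :=
  let cs := content.toList
  let header := pvHeader section_key.toList
  let sec_start := PySem.Chars.find cs (header ++ ['{'])
  let sec_open := PySem.Chars.findFrom cs ['{'] (sec_start + header.length)  -- content.index: Pre_ excludes -1 (ValueError)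
  let sec_close := pvBLoop (cs.drop (sec_open.toNat + 1)) (sec_open + 1) 1 (cs.length - 1)
  String.ofList (PySem.Chars.slice cs none (some sec_close) ++ '\n' :: new_text.toList ++ PySem.Chars.slice cs (some sec_close) none)

-- ===== PRECONDITION & SPEC =====
-- Pre_ excludes exactly the inputs on which content.index("{", …) raises ValueError in both programs.
def Pre_insert_before_close (content : String) (section_key : String) (new_text : String) : Prop :=
  let cs := content.toList
  let header := '\n' :: ' ' :: ' ' :: (section_key.toList ++ [':', ' '])
  PySem.Chars.findFrom cs ['{'] (PySem.Chars.find cs (header ++ ['{']) + header.length) ≠ -1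

instance (content : String) (section_key : String) (new_text : String) : Decidable (Pre_insert_before_close content section_key new_text) := by unfold Pre_insert_before_close; infer_instance

def pvWitness_insert_before_close : String × String × String := ("\n  a: {x}", "a", "y")

def Spec_insert_before_close (content : String) (section_key : String) (new_text : String) (out : String) : Prop := out = insert_before_close_alt content section_key new_text
instance (content : String) (section_key : String) (new_text : String) (out : String) : Decidable (Spec_insert_before_close content section_key new_text out) := by unfold Spec_insert_before_close; infer_instance

-- ===== CLAIM (what is proved, stated in full; the proofs are below) =====
def Claim_equal_insert_before_close : Prop := ∀ (content : String) (section_key : String) (new_text : String), Dom_insert_before_close content section_key new_text → Pre_insert_before_close content section_key new_text → Spec_insert_before_close content section_key new_text (insert_before_close content section_key new_text)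

-- ===== LEMMAS AND PROOFS =====

lemma pvWitness_ok : Dom_insert_before_close pvWitness_insert_before_close.1 pvWitness_insert_before_close.2.1 pvWitness_insert_before_close.2.2 ∧ Pre_insert_before_close pvWitness_insert_before_close.1 pvWitness_insert_before_close.2.1 pvWitness_insert_before_close.2.2 := by decide

lemma pvALoop_nonpos (rest : List Char) (j d : Int) (h : d ≤ 0) : pvALoop rest j d = j - 1 := by
  cases rest with
  | nil => rfl
  | cons c rest => simp [pvALoop]; omega

lemma infix_singleton_iff (b : Char) (l : List Char) : [b] <:+: l ↔ b ∈ l := by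
  constructor
  · intro h; exact h.mem (by simp)
  · intro h
    obtain ⟨s, t, rfl⟩ := List.append_of_mem h
    exact ⟨s, t, by simp⟩

lemma prefix_singleton (b : Char) (xs : List Char) : [b] <+: xs ↔ xs.head? = some b := by
  cases xs with
  | nil => simp
  | cons x t => simp; exact ⟨fun h => h.symm, fun h => h.symm⟩

lemma prefix_singleton_drop (b : Char) (l : List Char) (i : Nat) :
    [b] <+: l.drop i ↔ l[i]? = some b := by
  rw [prefix_singleton, List.head?_drop]

lemma find_singleton_cons (c b : Char) (cs : List Char) :
    PySem.Chars.find (c :: cs) [b] =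
      if c = b then 0
      else if PySem.Chars.find cs [b] = -1 then -1 else PySem.Chars.find cs [b] + 1 := by
  by_cases hcb : c = b
  · subst hcb
    have hinf : [c] <:+: c :: cs := (infix_singleton_iff c (c :: cs)).mpr (List.mem_cons_self)
    have h0 : 0 ≤ PySem.Chars.find (c :: cs) [c] := (PySem.Chars.find_nonneg_iff _ _).mpr hinf
    obtain ⟨hpre, hmin⟩ := PySem.Chars.find_spec h0
    have hz : (PySem.Chars.find (c :: cs) [c]).toNat = 0 := by
      by_contra hnz
      exact hmin 0 (Nat.pos_of_ne_zero hnz) (by simp)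
    rw [if_pos rfl]
    omega
  · rw [if_neg hcb]
    by_cases hk : PySem.Chars.find cs [b] = -1
    · rw [if_pos hk]
      have hnot : b ∉ cs := fun hm =>
        ((PySem.Chars.find_eq_neg_one_iff cs [b]).mp hk) ((infix_singleton_iff b cs).mpr hm)
      exact (PySem.Chars.find_eq_neg_one_iff _ _).mpr
        (fun hi => by
          rcases List.mem_cons.mp ((infix_singleton_iff b (c :: cs)).mp hi) with h | h
          · exact hcb h.symm
          · exact hnot h)
    · rw [if_neg hk]
      have hk0 : 0 ≤ PySem.Chars.find cs [b] := by
        have := PySem.Chars.neg_one_le_find cs [b]; omega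
      obtain ⟨hpreK, hminK⟩ := PySem.Chars.find_spec hk0
      have hmem : b ∈ cs := by
        have := (prefix_singleton_drop b cs _).mp hpreK
        exact List.mem_of_getElem? this
      have hF0 : 0 ≤ PySem.Chars.find (c :: cs) [b] :=
        (PySem.Chars.find_nonneg_iff _ _).mpr
          ((infix_singleton_iff b (c :: cs)).mpr (List.mem_cons_of_mem c hmem))
      obtain ⟨hpreF, hminF⟩ := PySem.Chars.find_spec hF0
      have hFnz : (PySem.Chars.find (c :: cs) [b]).toNat ≠ 0 := by
        intro hz
        rw [hz] at hpreF
        have h1 : (c :: cs).head? = some b := (prefix_singleton b _).mp (by simpa using hpreF)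
        have : c = b := by simpa using h1
        exact hcb this
      obtain ⟨m, hm⟩ : ∃ m, (PySem.Chars.find (c :: cs) [b]).toNat = m + 1 :=
        ⟨_, (Nat.succ_pred_eq_of_pos (Nat.pos_of_ne_zero hFnz)).symm⟩
      have hpreF' : [b] <+: cs.drop m := by
        rw [hm] at hpreF; simpa using hpreF
      have h1 : (PySem.Chars.find cs [b]).toNat ≤ m := by
        by_contra hlt
        exact hminK m (by omega) hpreF'
      have h2 : m ≤ (PySem.Chars.find cs [b]).toNat := by
        by_contra hlt
        exact hminF ((PySem.Chars.find cs [b]).toNat + 1) (by omega) (by simpa using hpreK)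
      omega

lemma pvALoop_no_close (rest : List Char) (j d : Int) (hd : 0 < d) (hc : '}' ∉ rest) :
    pvALoop rest j d = j + rest.length - 1 := by
  induction rest generalizing j d with
  | nil => simp [pvALoop]
  | cons c rest ih =>
    simp only [List.mem_cons, not_or] at hc
    have h1 : ¬ c = '}' := fun h => hc.1 h.symm
    by_cases ho : c = '{'
    · simp [pvALoop, hd, ho]
      rw [ih (j + 1) (d + 1) (by omega) hc.2]; ring
    · simp [pvALoop, hd, ho, h1]
      rw [ih (j + 1) d hd hc.2]; ring

lemma pvBLoop_cons (c : Char) (rest : List Char) (j d dflt : Int) :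
    pvBLoop (c :: rest) j d dflt =
      if c = '}' then (if d - 1 = 0 then j else pvBLoop rest (j + 1) (d - 1) dflt)
      else if c = '{' then (if PySem.Chars.find rest ['}'] = -1 then dflt else pvBLoop rest (j + 1) (d + 1) dflt)
      else pvBLoop rest (j + 1) d dflt := by
  have hK := PySem.Chars.neg_one_le_find rest ['}']
  have hO := PySem.Chars.neg_one_le_find rest ['{']
  rw [pvBLoop]
  rw [find_singleton_cons c '}' rest, find_singleton_cons c '{' rest]
  by_cases h1 : c = '}'
  · have h2 : ¬ c = '{' := by subst h1; decide
    rw [if_pos h1, if_neg h2, if_pos h1]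
    have hnc : ¬ ((0 : Int) = -1) := by decide
    rw [dif_neg hnc]
    have hcond : ¬ ((if PySem.Chars.find rest ['{'] = -1 then (-1 : Int)
        else PySem.Chars.find rest ['{'] + 1) ≠ -1 ∧
        (if PySem.Chars.find rest ['{'] = -1 then (-1 : Int)
        else PySem.Chars.find rest ['{'] + 1) < 0) := by
      split_ifs with h
      · simp
      · simp; omega
    rw [if_neg hcond]
    by_cases hd1 : d - 1 = 0
    · rw [if_pos hd1, if_pos hd1]; ring
    · rw [if_neg hd1, if_neg hd1]
      norm_num
  · rw [if_neg h1, if_neg h1]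
    by_cases hk : PySem.Chars.find rest ['}'] = -1
    · rw [if_pos hk, dif_pos rfl]
      by_cases h2 : c = '{'
      · rw [if_pos h2, if_pos hk]
      · rw [if_neg h2]
        conv_rhs => rw [pvBLoop]
        rw [dif_pos hk]
    · rw [if_neg hk, dif_neg (by omega : ¬ PySem.Chars.find rest ['}'] + 1 = -1)]
      by_cases h2 : c = '{'
      · rw [if_pos h2, if_pos h2, if_neg hk]
        have hcond : ((0 : Int) ≠ -1 ∧ (0 : Int) < PySem.Chars.find rest ['}'] + 1) := by
          constructor
          · decide
          · omega
        rw [if_pos hcond]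
        norm_num
      · rw [if_neg h2, if_neg h2]
        conv_rhs => rw [pvBLoop]
        rw [dif_neg hk]
        by_cases ho : PySem.Chars.find rest ['{'] = -1
        · rw [if_pos ho]
          have hcond : ¬ ((-1 : Int) ≠ -1 ∧ (-1 : Int) < PySem.Chars.find rest ['}'] + 1) := by simp
          rw [if_neg hcond]
          have hcond2 : ¬ (PySem.Chars.find rest ['{'] ≠ -1 ∧
              PySem.Chars.find rest ['{'] < PySem.Chars.find rest ['}']) := by
            rw [ho]; simp
          rw [if_neg hcond2]
          by_cases hd1 : d - 1 = 0
          · rw [if_pos hd1, if_pos hd1]; ring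
          · rw [if_neg hd1, if_neg hd1]
            have htn : (PySem.Chars.find rest ['}'] + 1).toNat + 1
                = (PySem.Chars.find rest ['}']).toNat + 1 + 1 := by omega
            rw [htn]
            simp only [List.drop_succ_cons]
            ring_nf
        · rw [if_neg ho]
          by_cases hlt : PySem.Chars.find rest ['{'] < PySem.Chars.find rest ['}']
          · have hcA : (PySem.Chars.find rest ['{'] + 1 ≠ -1 ∧
                PySem.Chars.find rest ['{'] + 1 < PySem.Chars.find rest ['}'] + 1) := by
              constructor
              · omega
              · omega
            have hcB : (PySem.Chars.find rest ['{'] ≠ -1 ∧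
                PySem.Chars.find rest ['{'] < PySem.Chars.find rest ['}']) := ⟨ho, hlt⟩
            rw [if_pos hcA, if_pos hcB]
            have htn : (PySem.Chars.find rest ['{'] + 1).toNat + 1
                = (PySem.Chars.find rest ['{']).toNat + 1 + 1 := by omega
            rw [htn]
            simp only [List.drop_succ_cons]
            ring_nf
          · have hcA : ¬ (PySem.Chars.find rest ['{'] + 1 ≠ -1 ∧
                PySem.Chars.find rest ['{'] + 1 < PySem.Chars.find rest ['}'] + 1) := by
              intro h; exact hlt (by omega)
            have hcB : ¬ (PySem.Chars.find rest ['{'] ≠ -1 ∧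
                PySem.Chars.find rest ['{'] < PySem.Chars.find rest ['}']) := by
              intro h; exact hlt h.2
            rw [if_neg hcA, if_neg hcB]
            by_cases hd1 : d - 1 = 0
            · rw [if_pos hd1, if_pos hd1]; ring
            · rw [if_neg hd1, if_neg hd1]
              have htn : (PySem.Chars.find rest ['}'] + 1).toNat + 1
                  = (PySem.Chars.find rest ['}']).toNat + 1 + 1 := by omega
              rw [htn]
              simp only [List.drop_succ_cons]
              ring_nf

lemma loop_eq (rest : List Char) (j d : Int) (hd : 0 < d) :
    pvALoop rest j d = pvBLoop rest j d (j + rest.length - 1) := by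
  induction rest generalizing j d with
  | nil =>
    rw [pvBLoop]
    simp [pvALoop, show PySem.Chars.find ([] : List Char) ['}'] = -1 by decide]
  | cons c rest ih =>
    have hlen : j + ((c :: rest).length : Int) - 1 = (j + 1) + (rest.length : Int) - 1 := by
      push_cast [List.length_cons]; ring
    rw [hlen, pvBLoop_cons]
    simp only [pvALoop, if_pos hd]
    by_cases h1 : c = '}'
    · have h2 : ¬ c = '{' := by subst h1; decide
      simp only [if_pos h1, if_neg h2]
      by_cases hd1 : d - 1 = 0
      · rw [if_pos hd1, pvALoop_nonpos rest (j + 1) (d - 1) (by omega)]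
        ring
      · rw [if_neg hd1, ih (j + 1) (d - 1) (by omega)]
    · by_cases h2 : c = '{'
      · simp only [if_pos h2, if_neg h1]
        by_cases hk : PySem.Chars.find rest ['}'] = -1
        · rw [if_pos hk]
          have hnot : '}' ∉ rest := fun hm =>
            ((PySem.Chars.find_eq_neg_one_iff rest ['}']).mp hk) ((infix_singleton_iff '}' rest).mpr hm)
          rw [pvALoop_no_close rest (j + 1) (d + 1) (by omega) hnot]
        · rw [if_neg hk, ih (j + 1) (d + 1) (by omega)]
      · simp only [if_neg h1, if_neg h2]
        exact ih (j + 1) d hd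

lemma findFrom_range (s : List Char) (b : Char) (s0 : Int) (h0 : 0 ≤ s0)
    (h : PySem.Chars.findFrom s [b] s0 ≠ -1) :
    0 ≤ PySem.Chars.findFrom s [b] s0 ∧ (PySem.Chars.findFrom s [b] s0).toNat < s.length := by
  rw [PySem.Chars.findFrom] at h ⊢
  simp only [if_neg (by omega : ¬ s0 < 0)] at h ⊢
  by_cases hle : (s.length : Int) < s0
  · rw [if_pos hle] at h
    exact absurd rfl h
  · rw [if_neg hle] at h ⊢
    by_cases hr : PySem.Chars.find (List.drop s0.toNat (List.take (s.length : Int).toNat s)) [b] = -1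
    · rw [if_pos hr] at h
      exact absurd rfl h
    · rw [if_neg hr] at h ⊢
      have hr0 : 0 ≤ PySem.Chars.find (List.drop s0.toNat (List.take (s.length : Int).toNat s)) [b] := by
        have := PySem.Chars.neg_one_le_find (List.drop s0.toNat (List.take (s.length : Int).toNat s)) [b]
        omega
      obtain ⟨hpre, -⟩ := PySem.Chars.find_spec hr0
      have hget := (prefix_singleton_drop b _ _).mp hpre
      have hlt := (List.getElem?_eq_some_iff.mp hget).1
      simp only [List.length_drop, List.length_take] at hlt
      constructor
      · omega
      · omega

-- ===== VERDICT (by name: the statement is the Claim_ definition above) =====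
theorem insert_before_close_spec : Claim_equal_insert_before_close := by
  intro content section_key new_text _ hpre
  unfold Spec_insert_before_close
  simp only [insert_before_close, insert_before_close_alt]
  unfold Pre_insert_before_close at hpre
  simp only [] at hpre
  rw [show ('\n' :: ' ' :: ' ' :: (section_key.toList ++ [':', ' '])) = pvHeader section_key.toList from rfl] at hpre
  set cs := content.toList with hcs
  set header := pvHeader section_key.toList with hh
  set o := PySem.Chars.findFrom cs ['{'] (PySem.Chars.find cs (header ++ ['{']) + (header.length : Int)) with ho
  have h0 : (0 : Int) ≤ PySem.Chars.find cs (header ++ ['{']) + (header.length : Int) := by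
    have h1 := PySem.Chars.neg_one_le_find cs (header ++ ['{'])
    have h2 : 5 ≤ header.length := by rw [hh]; simp [pvHeader]
    omega
  have hr := findFrom_range cs '{' _ h0 hpre
  rw [← ho] at hr
  have hloop := loop_eq (cs.drop (o.toNat + 1)) (o + 1) 1 (by norm_num)
  have hd : (o + 1) + ((cs.drop (o.toNat + 1)).length : Int) - 1 = (cs.length : Int) - 1 := by
    simp only [List.length_drop]
    omega
  rw [hd] at hloop
  rw [hloop]
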